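-- pv_equiv track=rewrite | github.com/hiimryo816/humob2023-MOBB | src/util.py | sum_dicts
-- ===== SOURCE A (Python) =====
-- from collections import Counter, defaultdict
--
-- def sum_dicts(uids, dict1, dict2):
--     merged_dict = defaultdict(lambda: defaultdict(Counter))
--
--     for uid in uids:
--         for t in range(48):  # t ranges from 0 to 47
--             if uid in dict1 and t in dict1[uid]:
--                 merged_dict[uid][t].update(dict1[uid][t])
--             if uid in dict2 and t in dict2[uid]:
--                 merged_dict[uid][t].update(dict2[uid][t])
--
--     return merged_dict
-- ===== SOURCE B (Python) =====
-- from collections import Counter, defaultdict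
--
-- def sum_dicts(uids, dict1, dict2):
--     merged_dict = defaultdict(lambda: defaultdict(Counter))
--
--     for uid in uids:
--         d1 = dict1.get(uid, {})
--         d2 = dict2.get(uid, {})
--         for t in sorted(set(d1) | set(d2)):
--             if 0 <= t < 48:
--                 merged_dict[uid][t].update(d1.get(t, ()))
--                 merged_dict[uid][t].update(d2.get(t, ()))
--
--     return merged_dict
-- ===== Notes on version B (the rewrite author's own statement) =====
-- stated objective: idiomatic
-- what changed: B iterates only over the sorted union of the time keys actually present for each uid (filtered to 0 <= t < 48, fetched once via dict.get) instead of scanning all 48 slots with membership tests per uid.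
import Mathlib
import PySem

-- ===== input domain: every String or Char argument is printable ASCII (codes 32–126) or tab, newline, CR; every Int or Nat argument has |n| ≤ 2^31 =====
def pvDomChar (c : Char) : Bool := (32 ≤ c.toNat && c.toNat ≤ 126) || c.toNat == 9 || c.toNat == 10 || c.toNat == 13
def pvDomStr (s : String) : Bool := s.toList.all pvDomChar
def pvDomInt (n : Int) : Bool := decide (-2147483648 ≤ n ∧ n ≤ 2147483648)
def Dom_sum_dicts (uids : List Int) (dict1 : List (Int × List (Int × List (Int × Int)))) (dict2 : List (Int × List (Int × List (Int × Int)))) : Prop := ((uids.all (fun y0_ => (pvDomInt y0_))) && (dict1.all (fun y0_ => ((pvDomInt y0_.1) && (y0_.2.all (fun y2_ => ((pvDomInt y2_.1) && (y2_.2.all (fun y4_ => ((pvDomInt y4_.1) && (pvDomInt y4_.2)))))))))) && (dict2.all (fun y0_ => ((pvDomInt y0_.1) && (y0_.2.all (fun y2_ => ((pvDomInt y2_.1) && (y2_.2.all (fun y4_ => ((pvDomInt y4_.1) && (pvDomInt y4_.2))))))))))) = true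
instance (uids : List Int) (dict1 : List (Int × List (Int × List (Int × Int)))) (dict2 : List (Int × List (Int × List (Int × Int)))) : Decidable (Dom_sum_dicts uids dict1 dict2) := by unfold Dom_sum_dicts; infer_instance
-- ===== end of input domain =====

-- B iterates only over the time keys actually present for each uid (sorted union, filtered to
-- 0 ≤ t < 48) instead of scanning all 48 slots; same merged result. Equivalence of return values.

-- ===== PORT A =====
-- shared faithful primitives for the Python statements both versions use:
-- "counter.update(l)"  (Counter.update: add each value onto the existing count, default 0)
def pvCUpd (c : PySem.Dict Int Int) (l : List (Int × Int)) : PySem.Dict Int Int :=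
  l.foldl (fun c kv => c.modify kv.1 0 (· + kv.2)) c

-- "merged_dict[uid][t].update(l)" on a defaultdict(lambda: defaultdict(Counter))
def pvDDUpd (m : PySem.Dict Int (PySem.Dict Int (PySem.Dict Int Int))) (uid t : Int)
    (l : List (Int × Int)) : PySem.Dict Int (PySem.Dict Int (PySem.Dict Int Int)) :=
  let inner := m.getD uid PySem.Dict.empty
  m.insert uid (inner.insert t (pvCUpd (inner.getD t PySem.Dict.empty) l))

-- the returned defaultdict, under the fixed type convention (nested association lists)
def pvUnpack (m : PySem.Dict Int (PySem.Dict Int (PySem.Dict Int Int))) :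
    List (Int × List (Int × List (Int × Int))) :=
  m.items.map (fun p => (p.1, p.2.items.map (fun q => (q.1, q.2.items))))

def sum_dicts (uids : List Int) (dict1 : List (Int × List (Int × List (Int × Int)))) (dict2 : List (Int × List (Int × List (Int × Int)))) : List (Int × List (Int × List (Int × Int))) :=
  pvUnpack (uids.foldl (fun m uid =>
    (PySem.List.pyRange 0 48 1).foldl (fun m t =>
      let m1 := match (PySem.Dict.mk dict1).get? uid with
        | some inn =>
          match (PySem.Dict.mk inn).get? t with
          | some c => pvDDUpd m uid t c
          | none => m
        | none => m
      match (PySem.Dict.mk dict2).get? uid with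
        | some inn =>
          match (PySem.Dict.mk inn).get? t with
          | some c => pvDDUpd m1 uid t c
          | none => m1
        | none => m1) m) PySem.Dict.empty)

-- ===== PORT B =====
def sum_dicts_alt (uids : List Int) (dict1 : List (Int × List (Int × List (Int × Int)))) (dict2 : List (Int × List (Int × List (Int × Int)))) : List (Int × List (Int × List (Int × Int))) :=
  pvUnpack (uids.foldl (fun m uid =>
    let d1 := ((PySem.Dict.mk dict1).get? uid).getD []
    let d2 := ((PySem.Dict.mk dict2).get? uid).getD []
    (PySem.List.sorted (PySem.Set.ofList (d1.map Prod.fst ++ d2.map Prod.fst)) (fun x => x)).foldl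
      (fun m t =>
        if 0 ≤ t ∧ t < 48 then
          pvDDUpd (pvDDUpd m uid t (((PySem.Dict.mk d1).get? t).getD []))
            uid t (((PySem.Dict.mk d2).get? t).getD [])
        else m) m) PySem.Dict.empty)

-- ===== PRECONDITION & SPEC =====
def Spec_sum_dicts (uids : List Int) (dict1 : List (Int × List (Int × List (Int × Int)))) (dict2 : List (Int × List (Int × List (Int × Int)))) (out : List (Int × List (Int × List (Int × Int)))) : Prop := out = sum_dicts_alt uids dict1 dict2
instance (uids : List Int) (dict1 : List (Int × List (Int × List (Int × Int)))) (dict2 : List (Int × List (Int × List (Int × Int)))) (out : List (Int × List (Int × List (Int × Int)))) : Decidable (Spec_sum_dicts uids dict1 dict2 out) := by unfold Spec_sum_dicts; infer_instance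

-- ===== CLAIM (what is proved, stated in full; the proofs are below) =====
def Claim_equal_sum_dicts : Prop := ∀ (uids : List Int) (dict1 : List (Int × List (Int × List (Int × Int)))) (dict2 : List (Int × List (Int × List (Int × Int)))), Dom_sum_dicts uids dict1 dict2 → Spec_sum_dicts uids dict1 dict2 (sum_dicts uids dict1 dict2)

-- ===== LEMMAS AND PROOFS =====

-- two consecutive updates of the same merged[uid][t] slot merge into one over the concatenation
theorem pvDDUpd_pvDDUpd (m : PySem.Dict Int (PySem.Dict Int (PySem.Dict Int Int))) (uid t : Int)
    (l1 l2 : List (Int × Int)) :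
    pvDDUpd (pvDDUpd m uid t l1) uid t l2 = pvDDUpd m uid t (l1 ++ l2) := by
  simp [pvDDUpd, pvCUpd, PySem.Dict.getD_insert_self, PySem.Dict.insert_insert_self,
    List.foldl_append]

-- dropping the elements on which the step is the identity
theorem foldl_eq_foldl_filter {α β : Type} (f : β → α → β) (p : α → Bool) (l : List α)
    (h : ∀ m, ∀ t ∈ l, p t = false → f m t = m) :
    ∀ m, l.foldl f m = (l.filter p).foldl f m := by
  induction l with
  | nil => intro m; rfl
  | cons x xs ih =>
    intro m
    by_cases hx : p x = true
    · simp only [List.filter_cons, hx, if_pos, List.foldl_cons]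
      exact ih (fun m t ht => h m t (List.mem_cons_of_mem _ ht)) _
    · have hx' : p x = false := by simpa using hx
      simp only [List.filter_cons, hx', List.foldl_cons, Bool.false_eq_true, if_false]
      rw [h m x (List.mem_cons_self) hx']
      exact ih (fun m t ht => h m t (List.mem_cons_of_mem _ ht)) _

-- two strictly increasing integer lists with the same members are equal
theorem eq_of_pairwise_lt_of_mem_iff (l1 l2 : List Int)
    (h1 : l1.Pairwise (· < ·)) (h2 : l2.Pairwise (· < ·))
    (hm : ∀ x, x ∈ l1 ↔ x ∈ l2) : l1 = l2 := by
  have n1 : l1.Nodup := h1.nodup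
  have n2 : l2.Nodup := h2.nodup
  have hp : l1.Perm l2 := (List.perm_ext_iff_of_nodup n1 n2).mpr hm
  exact List.Perm.eq_of_pairwise (fun a b _ _ hab hba => le_antisymm hab hba)
    (h1.imp le_of_lt) (h2.imp le_of_lt) hp

-- A's per-time step, expressed through the (possibly empty) inner dicts of the current uid
def pvGA (d1 d2 : List (Int × List (Int × Int))) (uid : Int)
    (m : PySem.Dict Int (PySem.Dict Int (PySem.Dict Int Int))) (t : Int) :
    PySem.Dict Int (PySem.Dict Int (PySem.Dict Int Int)) :=
  let m1 := match (PySem.Dict.mk d1).get? t with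
    | some c => pvDDUpd m uid t c
    | none => m
  match (PySem.Dict.mk d2).get? t with
    | some c => pvDDUpd m1 uid t c
    | none => m1

-- the per-uid inner loops agree
theorem inner_eq (dict1 dict2 : List (Int × List (Int × List (Int × Int)))) (uid : Int)
    (m : PySem.Dict Int (PySem.Dict Int (PySem.Dict Int Int))) :
    (PySem.List.pyRange 0 48 1).foldl (fun m t =>
      let m1 := match (PySem.Dict.mk dict1).get? uid with
        | some inn =>
          match (PySem.Dict.mk inn).get? t with
          | some c => pvDDUpd m uid t c
          | none => m
        | none => m
      match (PySem.Dict.mk dict2).get? uid with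
        | some inn =>
          match (PySem.Dict.mk inn).get? t with
          | some c => pvDDUpd m1 uid t c
          | none => m1
        | none => m1) m
    = (let d1 := ((PySem.Dict.mk dict1).get? uid).getD []
       let d2 := ((PySem.Dict.mk dict2).get? uid).getD []
       (PySem.List.sorted (PySem.Set.ofList (d1.map Prod.fst ++ d2.map Prod.fst)) (fun x => x)).foldl
        (fun m t =>
          if 0 ≤ t ∧ t < 48 then
            pvDDUpd (pvDDUpd m uid t (((PySem.Dict.mk d1).get? t).getD []))
              uid t (((PySem.Dict.mk d2).get? t).getD [])
          else m) m) := by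
  simp only []
  set d1 : List (Int × List (Int × Int)) := ((PySem.Dict.mk dict1).get? uid).getD [] with hd1
  set d2 : List (Int × List (Int × Int)) := ((PySem.Dict.mk dict2).get? uid).getD [] with hd2
  -- A's step, rewritten through d1/d2 (absent uid behaves as the empty inner dict)
  have stepA_eq : ∀ (m : PySem.Dict Int (PySem.Dict Int (PySem.Dict Int Int))) (t : Int),
      (let m1 := match (PySem.Dict.mk dict1).get? uid with
        | some inn =>
          match (PySem.Dict.mk inn).get? t with
          | some c => pvDDUpd m uid t c
          | none => m
        | none => m
       match (PySem.Dict.mk dict2).get? uid with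
        | some inn =>
          match (PySem.Dict.mk inn).get? t with
          | some c => pvDDUpd m1 uid t c
          | none => m1
        | none => m1) = pvGA d1 d2 uid m t := by
    intro m t
    rcases h1 : (PySem.Dict.mk dict1).get? uid with _ | inn1 <;>
      rcases h2 : (PySem.Dict.mk dict2).get? uid with _ | inn2 <;>
      simp only [pvGA, hd1, hd2, h1, h2, Option.getD_some, Option.getD_none] <;> rfl
  have hURange : ∀ (m : PySem.Dict Int (PySem.Dict Int (PySem.Dict Int Int))), ∀ t ∈ PySem.List.pyRange 0 48 1,
      (decide (t ∈ PySem.Set.ofList (d1.map Prod.fst ++ d2.map Prod.fst)) : Bool) = false →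
      pvGA d1 d2 uid m t = m := by
    intro m t _ ht
    have htU : t ∉ PySem.Set.ofList (d1.map Prod.fst ++ d2.map Prod.fst) := by
      simpa using ht
    rw [PySem.Set.mem_ofList, List.mem_append] at htU
    push Not at htU
    have g1 : (PySem.Dict.mk d1).get? t = none := by
      rw [PySem.Dict.get?_eq_none_iff_not_mem_keys]
      simpa [PySem.Dict.keys_mk] using htU.1
    have g2 : (PySem.Dict.mk d2).get? t = none := by
      rw [PySem.Dict.get?_eq_none_iff_not_mem_keys]
      simpa [PySem.Dict.keys_mk] using htU.2
    simp [pvGA, g1, g2]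
  -- the two filtered key lists coincide
  have hlist : (PySem.List.pyRange 0 48 1).filter
        (fun t => decide (t ∈ PySem.Set.ofList (d1.map Prod.fst ++ d2.map Prod.fst)))
      = (PySem.List.sorted (PySem.Set.ofList (d1.map Prod.fst ++ d2.map Prod.fst)) (fun x => x)).filter
        (fun t => decide (0 ≤ t ∧ t < 48)) := by
    apply eq_of_pairwise_lt_of_mem_iff
    · exact List.Pairwise.filter _ (by decide)
    · exact List.Pairwise.filter _ (PySem.List.sorted_ofList_pairwise_lt _)
    · intro x
      simp only [List.mem_filter, PySem.List.mem_pyRange_one, PySem.List.mem_sorted,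
        decide_eq_true_eq]
      tauto
  -- pointwise agreement on the shared key list
  have hpt : ∀ (m : PySem.Dict Int (PySem.Dict Int (PySem.Dict Int Int))), ∀ t ∈ (PySem.List.pyRange 0 48 1).filter
        (fun t => decide (t ∈ PySem.Set.ofList (d1.map Prod.fst ++ d2.map Prod.fst))),
      pvGA d1 d2 uid m t =
        (if 0 ≤ t ∧ t < 48 then
          pvDDUpd (pvDDUpd m uid t (((PySem.Dict.mk d1).get? t).getD []))
            uid t (((PySem.Dict.mk d2).get? t).getD [])
        else m) := by
    intro m t ht
    rw [List.mem_filter] at ht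
    obtain ⟨htr, htu⟩ := ht
    rw [PySem.List.mem_pyRange_one] at htr
    rw [if_pos htr, pvDDUpd_pvDDUpd]
    have htu' : t ∈ d1.map Prod.fst ∨ t ∈ d2.map Prod.fst := by
      have := of_decide_eq_true htu
      rw [PySem.Set.mem_ofList, List.mem_append] at this
      exact this
    rcases g1 : (PySem.Dict.mk d1).get? t with _ | c1 <;>
      rcases g2 : (PySem.Dict.mk d2).get? t with _ | c2
    · exfalso
      rw [PySem.Dict.get?_eq_none_iff_not_mem_keys] at g1 g2
      simp only [PySem.Dict.keys_mk] at g1 g2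
      tauto
    · simp [pvGA, g1, g2]
    · simp [pvGA, g1, g2]
    · simp [pvGA, g1, g2, pvDDUpd_pvDDUpd]
  calc (PySem.List.pyRange 0 48 1).foldl _ m
      = (PySem.List.pyRange 0 48 1).foldl (pvGA d1 d2 uid) m :=
        PySem.List.foldl_congr_mem _ _ _ _ (fun m t _ => stepA_eq m t)
    _ = ((PySem.List.pyRange 0 48 1).filter
          (fun t => decide (t ∈ PySem.Set.ofList (d1.map Prod.fst ++ d2.map Prod.fst)))).foldl
          (pvGA d1 d2 uid) m :=
        foldl_eq_foldl_filter _ _ _ (fun m t ht hf => hURange m t ht hf) m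
    _ = ((PySem.List.pyRange 0 48 1).filter
          (fun t => decide (t ∈ PySem.Set.ofList (d1.map Prod.fst ++ d2.map Prod.fst)))).foldl
          (fun m t =>
            if 0 ≤ t ∧ t < 48 then
              pvDDUpd (pvDDUpd m uid t (((PySem.Dict.mk d1).get? t).getD []))
                uid t (((PySem.Dict.mk d2).get? t).getD [])
            else m) m :=
        PySem.List.foldl_congr_mem _ _ _ _ hpt
    _ = ((PySem.List.sorted (PySem.Set.ofList (d1.map Prod.fst ++ d2.map Prod.fst)) (fun x => x)).filter
          (fun t => decide (0 ≤ t ∧ t < 48))).foldl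
          (fun m t =>
            if 0 ≤ t ∧ t < 48 then
              pvDDUpd (pvDDUpd m uid t (((PySem.Dict.mk d1).get? t).getD []))
                uid t (((PySem.Dict.mk d2).get? t).getD [])
            else m) m := by rw [hlist]
    _ = (PySem.List.sorted (PySem.Set.ofList (d1.map Prod.fst ++ d2.map Prod.fst)) (fun x => x)).foldl
          (fun m t =>
            if 0 ≤ t ∧ t < 48 then
              pvDDUpd (pvDDUpd m uid t (((PySem.Dict.mk d1).get? t).getD []))
                uid t (((PySem.Dict.mk d2).get? t).getD [])
            else m) m := by
        refine (foldl_eq_foldl_filter _ _ _ ?_ m).symm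
        intro m t _ hf
        rw [if_neg (by simpa using hf)]

-- ===== VERDICT (by name: the statement is the Claim_ definition above) =====
theorem sum_dicts_spec : Claim_equal_sum_dicts := by
  intro uids dict1 dict2 _
  unfold Spec_sum_dicts sum_dicts sum_dicts_alt
  refine congrArg pvUnpack ?_
  refine PySem.List.foldl_congr_mem uids _ _ _ ?_
  intro m uid _
  exact inner_eq dict1 dict2 uid m
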